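-- pv_equiv track=rewrite | github.com/artssath/AOC-2024-1 | 1.py | calculate_total_similarity
-- ===== SOURCE A (Python) =====
-- def calculate_total_similarity(left_dist, right_dist):
--     total_similarity=0
--     count_dict={}
--     for r_num in right_dist:
--         if r_num not in count_dict.keys():
--             count_dict[r_num]=0
--         count_dict[r_num] +=1
--
--     for l_num in left_dist:
--         if l_num in count_dict.keys():
--             total_similarity += l_num * count_dict[l_num]
--     return total_similarity
-- ===== SOURCE B (Python) =====
-- def calculate_total_similarity(left_dist, right_dist):
--     # Sort both lists, then sweep them together with two pointers:
--     # matching values form runs; each match contributes v * (run length in L) * (run length in R).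
--     L = sorted(left_dist)
--     R = sorted(right_dist)
--     i = j = 0
--     total = 0
--     while i < len(L) and j < len(R):
--         if L[i] < R[j]:
--             i += 1
--         elif R[j] < L[i]:
--             j += 1
--         else:
--             v = L[i]
--             ci = 0
--             while i < len(L) and L[i] == v:
--                 i += 1
--                 ci += 1
--             cj = 0
--             while j < len(R) and R[j] == v:
--                 j += 1
--                 cj += 1
--             total += v * ci * cj
--     return total
-- ===== Notes on version B (the rewrite author's own statement) =====
-- stated objective: alternative
-- what changed: B builds no frequency dict: it sorts both lists and does a two-pointer merge sweep, adding v*(run length in left)*(run length in right) for each common value.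
import Mathlib
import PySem

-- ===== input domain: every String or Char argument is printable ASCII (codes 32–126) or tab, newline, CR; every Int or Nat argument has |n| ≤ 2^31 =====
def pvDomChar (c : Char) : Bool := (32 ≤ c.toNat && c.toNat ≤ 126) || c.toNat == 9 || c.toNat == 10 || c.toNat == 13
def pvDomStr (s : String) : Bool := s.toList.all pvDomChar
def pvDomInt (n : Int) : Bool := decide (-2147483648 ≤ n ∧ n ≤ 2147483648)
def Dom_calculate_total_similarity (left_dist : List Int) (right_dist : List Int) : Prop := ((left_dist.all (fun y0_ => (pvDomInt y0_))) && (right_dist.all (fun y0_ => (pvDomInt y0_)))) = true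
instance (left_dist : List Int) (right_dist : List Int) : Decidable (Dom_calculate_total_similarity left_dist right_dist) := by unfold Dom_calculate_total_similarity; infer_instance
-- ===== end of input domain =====

-- B builds no frequency dict: it sorts both lists and sweeps them with two pointers over runs of
-- equal values (a different algorithm, not claimed faster).

-- ===== PORT A =====
-- first loop body: if r not in count_dict.keys(): count_dict[r]=0 ; count_dict[r] += 1
def pvStepA (d : PySem.Dict Int Int) (r : Int) : PySem.Dict Int Int :=
  let d' := if d.contains r then d else d.insert r 0
  d'.insert r (d'.getD r 0 + 1)

def calculate_total_similarity (left_dist : List Int) (right_dist : List Int) : Int :=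
  let count_dict := right_dist.foldl pvStepA PySem.Dict.empty
  left_dist.foldl (fun total l =>
    if count_dict.contains l then total + l * count_dict.getD l 0 else total) 0

-- ===== PORT B =====
-- the two-pointer sweep of Source B: pointer advances become recursion on suffixes; the inner
-- run-counting while-loops are the takeWhile/dropWhile of the current value at the front.
def pvMerge : List Int → List Int → Int
  | [], _ => 0
  | _ :: _, [] => 0
  | a :: ls, b :: rs =>
    if a < b then pvMerge ls (b :: rs)
    else if b < a then pvMerge (a :: ls) rs
    else
      let restL := (a :: ls).dropWhile (· == a)
      let restR := (b :: rs).dropWhile (· == a)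
      a * ((a :: ls).takeWhile (· == a)).length * ((b :: rs).takeWhile (· == a)).length
        + pvMerge restL restR
termination_by L R => L.length + R.length
decreasing_by
  · simp only [List.length_cons]
    omega
  · simp only [List.length_cons]
    omega
  · have h1 : ((a :: ls).dropWhile (· == a)).length ≤ ls.length := by
      simp only [List.dropWhile_cons, BEq.rfl, if_true]
      exact (List.dropWhile_sublist _).length_le
    have h2 : ((b :: rs).dropWhile (· == a)).length ≤ rs.length + 1 :=
      (List.dropWhile_sublist (l := b :: rs) _).length_le
    simp only [List.length_cons] at *
    omega

def calculate_total_similarity_alt (left_dist : List Int) (right_dist : List Int) : Int :=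
  pvMerge (PySem.List.sorted left_dist (fun x => x) false)
          (PySem.List.sorted right_dist (fun x => x) false)

-- ===== PRECONDITION & SPEC =====
def Spec_calculate_total_similarity (left_dist : List Int) (right_dist : List Int) (out : Int) : Prop := out = calculate_total_similarity_alt left_dist right_dist
instance (left_dist : List Int) (right_dist : List Int) (out : Int) : Decidable (Spec_calculate_total_similarity left_dist right_dist out) := by unfold Spec_calculate_total_similarity; infer_instance

-- ===== CLAIM (what is proved, stated in full; the proofs are below) =====
def Claim_equal_calculate_total_similarity : Prop := ∀ (left_dist : List Int) (right_dist : List Int), Dom_calculate_total_similarity left_dist right_dist → Spec_calculate_total_similarity left_dist right_dist (calculate_total_similarity left_dist right_dist)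

-- ===== LEMMAS AND PROOFS =====

-- A-side: the dict after the first loop is the frequency table of right_dist.
lemma stepA_getD (d : PySem.Dict Int Int) (x v : Int) :
    (pvStepA d x).getD v 0 = d.getD v 0 + (if v = x then 1 else 0) := by
  unfold pvStepA
  have hsplit := fun (h : d.contains x = false) => PySem.Dict.getD_of_not_contains (d := d) (k := x) (d0 := (0 : Int)) h
  by_cases hc : d.contains x = true <;> by_cases hv : v = x <;>
    simp [hc, hv, PySem.Dict.getD_insert]
  · exact hsplit (by simpa using hc)

lemma foldA_getD (l : List Int) (d : PySem.Dict Int Int) (v : Int) :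
    (l.foldl pvStepA d).getD v 0 = d.getD v 0 + (l.count v : Int) := by
  induction l generalizing d with
  | nil => simp
  | cons x xs ih =>
      simp only [List.foldl_cons, ih, stepA_getD, List.count_cons]
      by_cases hv : v = x
      · simp only [hv, beq_self_eq_true, if_true]
        push_cast
        ring
      · simp [hv, Ne.symm hv]

lemma stepA_contains (d : PySem.Dict Int Int) (x v : Int) :
    (pvStepA d x).contains v = (v == x || d.contains v) := by
  unfold pvStepA
  by_cases hc : d.contains x = true <;>
    simp [hc, PySem.Dict.contains_insert]

lemma foldA_contains (l : List Int) (d : PySem.Dict Int Int) (v : Int) :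
    (l.foldl pvStepA d).contains v = (d.contains v || l.contains v) := by
  induction l generalizing d with
  | nil => simp
  | cons x xs ih =>
      simp only [List.foldl_cons, ih, stepA_contains, List.contains_cons]
      cases d.contains v <;> simp

-- the membership guard of A's second loop is redundant: count is 0 for absent values
lemma fold_if (right : List Int) (left : List Int) (t : Int) :
    left.foldl (fun total l =>
      if right.contains l then total + l * (right.count l : Int) else total) t
    = left.foldl (fun total l => total + l * (right.count l : Int)) t := by
  induction left generalizing t with
  | nil => rfl
  | cons x xs ih =>
      simp only [List.foldl_cons]
      rw [ih]
      by_cases hx : x ∈ right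
      · simp [hx]
      · simp [hx, List.count_eq_zero.mpr hx]

-- A computes the weighted sum Σ_{l ∈ left} l · (count of l in right)
lemma a_as_sum (left right : List Int) :
    calculate_total_similarity left right
      = (left.map (fun l => l * (right.count l : Int))).sum := by
  unfold calculate_total_similarity
  simp only [foldA_contains, foldA_getD,
    PySem.Dict.contains_empty, PySem.Dict.getD_empty, Bool.false_or, Int.zero_add]
  rw [fold_if, PySem.List.foldl_add]
  simp

-- B-side: elements surviving the dropWhile-(== a) of a sorted list all exceed a
lemma run_facts (a : Int) (xs : List Int) (hx : xs.Pairwise (· ≤ ·))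
    (hge : ∀ y ∈ xs, a ≤ y) :
    ∀ y ∈ xs.dropWhile (· == a), a < y := by
  intro y hy
  rcases hdw : xs.dropWhile (· == a) with _ | ⟨h, t⟩
  · simp [hdw] at hy
  · have hne : xs.dropWhile (· == a) ≠ [] := by simp [hdw]
    have hhead := List.head_dropWhile_not (· == a) hne
    have hha : h ≠ a := by
      intro he
      rw [show (xs.dropWhile (· == a)).head hne = h from by simp [hdw]] at hhead
      simp [he] at hhead
    have hmemh : h ∈ xs := (List.dropWhile_sublist _).mem (by rw [hdw]; exact List.mem_cons_self)
    have hah : a < h := lt_of_le_of_ne (hge h hmemh) (Ne.symm hha)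
    have hsorted : (h :: t).Pairwise (· ≤ ·) := hdw ▸ hx.sublist (List.dropWhile_sublist _)
    rw [hdw] at hy
    rcases List.mem_cons.mp hy with rfl | hyt
    · exact hah
    · exact lt_of_lt_of_le hah (List.rel_of_pairwise_cons hsorted hyt)

-- on a sorted list bounded below by a, the count of a is the length of the initial (== a) run
lemma count_eq_run_length (a : Int) (xs : List Int) (hx : xs.Pairwise (· ≤ ·))
    (hge : ∀ y ∈ xs, a ≤ y) :
    xs.count a = (xs.takeWhile (· == a)).length := by
  have h1 : (xs.takeWhile (· == a)).count a = (xs.takeWhile (· == a)).length := by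
    rw [List.count_eq_length]
    intro y hy
    exact (eq_of_beq (List.mem_takeWhile_imp (p := (· == a)) (l := xs) hy)).symm
  have h2 : (xs.dropWhile (· == a)).count a = 0 := by
    rw [List.count_eq_zero]
    intro hmem
    exact absurd (run_facts a xs hx hge a hmem) (lt_irrefl a)
  conv_lhs => rw [show xs = xs.takeWhile (· == a) ++ xs.dropWhile (· == a) from (List.takeWhile_append_dropWhile).symm]
  rw [List.count_append, h1, h2]
  omega

-- the sweep over two sorted lists computes the same weighted sum
lemma merge_eq_sum (L R : List Int) (hL : L.Pairwise (· ≤ ·)) (hR : R.Pairwise (· ≤ ·)) :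
    pvMerge L R = (L.map (fun l => l * (R.count l : Int))).sum := by
  induction L, R using pvMerge.induct with
  | case1 R => simp [pvMerge]
  | case2 a ls => simp [pvMerge]
  | case3 a ls b rs hab ih =>
      have hcount : (b :: rs).count a = 0 := by
        rw [List.count_eq_zero]
        intro hmem
        rcases List.mem_cons.mp hmem with rfl | hmem
        · exact absurd hab (lt_irrefl a)
        · have := List.rel_of_pairwise_cons hR hmem
          omega
      rw [pvMerge]
      simp only [if_pos hab, List.map_cons, List.sum_cons, hcount, ih hL.tail hR]
      simp
  | case4 a ls b rs hab hba ih =>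
      have hmapeq : (a :: ls).map (fun l => l * ((b :: rs).count l : Int))
          = (a :: ls).map (fun l => l * (rs.count l : Int)) := by
        apply List.map_congr_left
        intro x hx
        have hax : a ≤ x := by
          rcases List.mem_cons.mp hx with rfl | hx
          · exact le_refl x
          · exact List.rel_of_pairwise_cons hL hx
        have hbx : b ≠ x := by omega
        simp [hbx]
      rw [pvMerge]
      simp only [if_neg hab, if_pos hba]
      rw [ih hL hR.tail, ← hmapeq]
  | case5 a ls b rs hab hba rL rR ih =>
      have hba' : b = a := le_antisymm (by omega) (by omega)
      subst hba'
      have hgeL : ∀ y ∈ b :: ls, b ≤ y := by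
        intro y hy
        rcases List.mem_cons.mp hy with rfl | hy
        · exact le_refl y
        · exact List.rel_of_pairwise_cons hL hy
      have hgeR : ∀ y ∈ b :: rs, b ≤ y := by
        intro y hy
        rcases List.mem_cons.mp hy with rfl | hy
        · exact le_refl y
        · exact List.rel_of_pairwise_cons hR hy
      have hsL : ((b :: ls).dropWhile (· == b)).Pairwise (· ≤ ·) := hL.sublist (List.dropWhile_sublist _)
      have hsR : ((b :: rs).dropWhile (· == b)).Pairwise (· ≤ ·) := hR.sublist (List.dropWhile_sublist _)
      have ihv := ih hsL hsR
      -- the run part: every element of the takeWhile run is b, so each term is b · count(b)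
      have hrunmap : ((b :: ls).takeWhile (· == b)).map (fun l => l * ((b :: rs).count l : Int))
          = ((b :: ls).takeWhile (· == b)).map (fun _ => b * ((b :: rs).count b : Int)) := by
        apply List.map_congr_left
        intro y hy
        rw [eq_of_beq (List.mem_takeWhile_imp (p := (· == b)) (l := b :: ls) hy)]
      have hrunsum : (((b :: ls).takeWhile (· == b)).map (fun l => l * ((b :: rs).count l : Int))).sum
          = b * (((b :: ls).takeWhile (· == b)).length : Int) * (((b :: rs).takeWhile (· == b)).length : Int) := by
        rw [hrunmap, PySem.List.sum_map_const_int]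
        rw [count_eq_run_length b (b :: rs) hR hgeR]
        ring
      -- the tail part: counts over R restrict to counts over R's dropWhile suffix
      have htailmap : ((b :: ls).dropWhile (· == b)).map (fun l => l * ((b :: rs).count l : Int))
          = ((b :: ls).dropWhile (· == b)).map (fun l => l * (((b :: rs).dropWhile (· == b)).count l : Int)) := by
        apply List.map_congr_left
        intro x hx
        have hbx : b < x := run_facts b (b :: ls) hL hgeL x hx
        have hcnt : (b :: rs).count x = ((b :: rs).dropWhile (· == b)).count x := by
          conv_lhs => rw [show b :: rs = (b :: rs).takeWhile (· == b) ++ (b :: rs).dropWhile (· == b) from (List.takeWhile_append_dropWhile).symm]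
          rw [List.count_append]
          have h0 : ((b :: rs).takeWhile (· == b)).count x = 0 := by
            rw [List.count_eq_zero]
            intro hmem
            have := eq_of_beq (List.mem_takeWhile_imp (p := (· == b)) (l := b :: rs) hmem)
            omega
          omega
        rw [hcnt]
      rw [pvMerge]
      simp only [if_neg hab]
      conv_rhs => rw [show b :: ls = (b :: ls).takeWhile (· == b) ++ (b :: ls).dropWhile (· == b) from (List.takeWhile_append_dropWhile).symm]
      rw [List.map_append, List.sum_append, hrunsum, htailmap, ← ihv]

-- ===== VERDICT (by name: the statement is the Claim_ definition above) =====
theorem calculate_total_similarity_spec : Claim_equal_calculate_total_similarity := by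
  intro left right _
  show calculate_total_similarity left right = calculate_total_similarity_alt left right
  rw [a_as_sum]
  unfold calculate_total_similarity_alt
  have hpL : (PySem.List.sorted left (fun x => x) false).Pairwise (· ≤ ·) := by
    simpa using PySem.List.sorted_pairwise left (fun x => x)
  have hpR : (PySem.List.sorted right (fun x => x) false).Pairwise (· ≤ ·) := by
    simpa using PySem.List.sorted_pairwise right (fun x => x)
  rw [merge_eq_sum _ _ hpL hpR]
  have hcnt : ∀ l : Int, (PySem.List.sorted right (fun x => x) false).count l = right.count l :=
    fun l => (PySem.List.sorted_perm right (fun x => x) false).count_eq l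
  simp only [hcnt]
  exact (((PySem.List.sorted_perm left (fun x => x) false).map
    (fun l => l * (right.count l : Int))).sum_eq).symm
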